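-- pv_equiv track=rewrite | github.com/Bufias/laia | recursio/sanefa.py | get_sanefa
-- ===== SOURCE A (Python) =====
-- def get_sanefa(n, d, accumulated_sheeps, white_sheeps=0):
--     if len(accumulated_sheeps) == n:
--         return accumulated_sheeps
--
--     if white_sheeps == d:
--         accumulated_sheeps.append(0)
--         return get_sanefa(n, d, accumulated_sheeps)
--
--     accumulated_sheeps.append(1)
--     return get_sanefa(n, d, accumulated_sheeps, white_sheeps + 1)
-- ===== SOURCE B (Python) =====
-- def get_sanefa(n, d, accumulated_sheeps, white_sheeps=0):
--     # Iterative: append exactly the missing number of elements (mutates the list like A).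
--     missing = n - len(accumulated_sheeps)
--     for _ in range(missing):
--         if white_sheeps == d:
--             accumulated_sheeps.append(0)
--             white_sheeps = 0
--         else:
--             accumulated_sheeps.append(1)
--             white_sheeps += 1
--     return accumulated_sheeps
-- ===== Notes on version B (the rewrite author's own statement) =====
-- stated objective: simpler
-- what changed: Replaces the tail recursion with a single for-loop over the missing count, updating the white_sheeps counter in place.
import Mathlib
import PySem

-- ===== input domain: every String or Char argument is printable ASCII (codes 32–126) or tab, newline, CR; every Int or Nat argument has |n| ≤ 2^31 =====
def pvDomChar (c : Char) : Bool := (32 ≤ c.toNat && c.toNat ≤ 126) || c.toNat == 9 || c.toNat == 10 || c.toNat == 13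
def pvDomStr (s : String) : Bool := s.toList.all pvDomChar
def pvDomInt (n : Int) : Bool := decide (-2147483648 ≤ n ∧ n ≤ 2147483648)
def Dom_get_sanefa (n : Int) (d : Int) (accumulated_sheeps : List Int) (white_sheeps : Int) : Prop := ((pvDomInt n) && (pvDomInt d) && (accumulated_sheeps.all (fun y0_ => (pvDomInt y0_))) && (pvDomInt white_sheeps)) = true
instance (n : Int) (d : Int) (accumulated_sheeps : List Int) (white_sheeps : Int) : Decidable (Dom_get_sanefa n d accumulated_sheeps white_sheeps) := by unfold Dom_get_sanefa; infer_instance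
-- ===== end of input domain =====

-- B replaces A's tail recursion by a single for-loop over the missing count (objective: simpler,
-- no recursion depth). Both Pythons mutate accumulated_sheeps in place; equivalence here is about
-- the return value.

-- ===== PORT A =====
-- Literal port of A's recursion. The `n < length` guard only makes the recursion total in Lean:
-- there Python A recurses forever (RecursionError); such inputs are excluded by Pre_.
def get_sanefa (n : Int) (d : Int) (accumulated_sheeps : List Int) (white_sheeps : Int) : List Int :=
  if (accumulated_sheeps.length : Int) = n then accumulated_sheeps
  else if n < (accumulated_sheeps.length : Int) then accumulated_sheeps
  else if white_sheeps = d then get_sanefa n d (accumulated_sheeps ++ [0]) 0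
  else get_sanefa n d (accumulated_sheeps ++ [1]) (white_sheeps + 1)
termination_by (n - accumulated_sheeps.length).toNat
decreasing_by all_goals (simp only [List.length_append, List.length_cons, List.length_nil]; omega)

-- ===== PORT B =====
-- One step of B's loop body
def sanefaStep (d : Int) (st : List Int × Int) : List Int × Int :=
  if st.2 = d then (st.1 ++ [0], 0) else (st.1 ++ [1], st.2 + 1)

-- Port of B: for-loop over range(missing) (empty when missing ≤ 0), threading (list, counter)
def get_sanefa_alt (n : Int) (d : Int) (accumulated_sheeps : List Int) (white_sheeps : Int) : List Int :=
  ((List.range (n - accumulated_sheeps.length).toNat).foldl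
    (fun st _ => sanefaStep d st) (accumulated_sheeps, white_sheeps)).1

-- ===== PRECONDITION & SPEC =====
-- Pre_ excludes exactly the inputs on which A never returns: when the list is already longer
-- than n each recursive call overshoots n and A raises RecursionError.
def Pre_get_sanefa (n : Int) (d : Int) (accumulated_sheeps : List Int) (white_sheeps : Int) : Prop :=
  (accumulated_sheeps.length : Int) ≤ n
instance (n : Int) (d : Int) (accumulated_sheeps : List Int) (white_sheeps : Int) : Decidable (Pre_get_sanefa n d accumulated_sheeps white_sheeps) := by unfold Pre_get_sanefa; infer_instance

def pvWitness_get_sanefa : Int × Int × List Int × Int := (5, 2, [1, 0], 1)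


def Spec_get_sanefa (n : Int) (d : Int) (accumulated_sheeps : List Int) (white_sheeps : Int) (out : List Int) : Prop := out = get_sanefa_alt n d accumulated_sheeps white_sheeps
instance (n : Int) (d : Int) (accumulated_sheeps : List Int) (white_sheeps : Int) (out : List Int) : Decidable (Spec_get_sanefa n d accumulated_sheeps white_sheeps out) := by unfold Spec_get_sanefa; infer_instance

-- ===== CLAIM (what is proved, stated in full; the proofs are below) =====
def Claim_equal_get_sanefa : Prop := ∀ (n : Int) (d : Int) (accumulated_sheeps : List Int) (white_sheeps : Int), Dom_get_sanefa n d accumulated_sheeps white_sheeps → Pre_get_sanefa n d accumulated_sheeps white_sheeps → Spec_get_sanefa n d accumulated_sheeps white_sheeps (get_sanefa n d accumulated_sheeps white_sheeps)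

-- ===== LEMMAS AND PROOFS =====

-- a foldl that ignores the list elements is an iterate
theorem foldl_range_ignore {σ : Type} (f : σ → σ) (m : Nat) (init : σ) :
    (List.range m).foldl (fun s _ => f s) init = f^[m] init := by
  induction m generalizing init with
  | zero => simp
  | succ k ih =>
      rw [List.range_succ, List.foldl_append, ih]
      simp [← Function.iterate_succ_apply' f k]

-- A's recursion computes the iterate of B's loop body
theorem get_sanefa_eq_iterate (n d : Int) : ∀ (m : Nat) (acc : List Int) (ws : Int),
    (n - acc.length).toNat = m →
    get_sanefa n d acc ws = ((sanefaStep d)^[m] (acc, ws)).1 := by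
  intro m
  induction m with
  | zero =>
      intro acc ws h
      rw [get_sanefa]
      have : (acc.length : Int) = n ∨ n < (acc.length : Int) := by omega
      rcases this with h1 | h1
      · simp [h1]
      · have h2 : ¬ ((acc.length : Int) = n) := by omega
        simp [h1, h2]
  | succ k ih =>
      intro acc ws h
      have hlt : (acc.length : Int) < n := by omega
      rw [get_sanefa]
      have h1 : ¬ ((acc.length : Int) = n) := by omega
      have h2 : ¬ (n < (acc.length : Int)) := by omega
      rw [if_neg h1, if_neg h2, Function.iterate_succ_apply]
      by_cases hw : ws = d
      · rw [if_pos hw]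
        have : sanefaStep d (acc, ws) = (acc ++ [0], 0) := by simp [sanefaStep, hw]
        rw [this, ih]
        simp only [List.length_append, List.length_cons, List.length_nil]; omega
      · rw [if_neg hw]
        have : sanefaStep d (acc, ws) = (acc ++ [1], ws + 1) := by simp [sanefaStep, hw]
        rw [this, ih]
        simp only [List.length_append, List.length_cons, List.length_nil]; omega

-- ===== VERDICT (by name: the statement is the Claim_ definition above) =====
theorem get_sanefa_spec : Claim_equal_get_sanefa := by
  intro n d acc ws _ _
  unfold Spec_get_sanefa get_sanefa_alt
  rw [foldl_range_ignore]
  exact get_sanefa_eq_iterate n d _ acc ws rfl
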